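-- pv_equiv track=rewrite | github.com/animeshokhade/dsa | scaler/Maximum positivity.py | solve
-- ===== SOURCE A (Python) =====
-- def solve(A):
--     n = len(A)
--     ans = []
--     for s in range(n):
--         for e in range(s, n):
--             subArray = A[s:e + 1]
--             m = len(subArray)
--             flag = True
--             for num in subArray:
--                 if num < 0:
--                     flag = False
--             if flag:
--                 if m > len(ans):
--                     ans = subArray
--     return ans
-- ===== SOURCE B (Python) =====
-- def solve(A):
--     best = []
--     cur = []
--     for x in A:
--         if x < 0:
--             cur = []
--         else:
--             cur = cur + [x]
--             if len(cur) > len(best):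
--                 best = cur
--     return best
-- ===== Notes on version B (the rewrite author's own statement) =====
-- stated objective: faster
-- what changed: Replaced the triple loop enumerating and re-scanning every subarray by a single left-to-right pass that maintains the current nonnegative run and keeps the first strictly-longest run seen.
import Mathlib
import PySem

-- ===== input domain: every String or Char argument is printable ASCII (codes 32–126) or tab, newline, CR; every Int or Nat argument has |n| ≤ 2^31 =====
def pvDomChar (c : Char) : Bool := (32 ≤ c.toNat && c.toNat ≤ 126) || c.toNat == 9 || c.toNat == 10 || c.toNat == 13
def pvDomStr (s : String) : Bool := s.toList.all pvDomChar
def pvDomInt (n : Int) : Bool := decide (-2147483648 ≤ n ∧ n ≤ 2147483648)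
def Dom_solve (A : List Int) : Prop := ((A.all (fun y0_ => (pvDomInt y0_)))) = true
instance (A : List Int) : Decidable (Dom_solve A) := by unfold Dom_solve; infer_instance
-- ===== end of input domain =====

-- B changes the algorithm: a single pass keeping the current nonnegative run and the first
-- longest run seen, instead of A's triple loop over all subarrays.

-- ===== PORT A =====
-- the inner-loop body of A, named for the proofs (same code, same branches)
def solveInner (A : List Int) (s : Int) (ans : List Int) (e : Int) : List Int :=
  let subArray := PySem.List.slice A (some s) (some (e + 1))
  let m : Int := subArray.length
  let flag := subArray.foldl (fun f num => if num < 0 then false else f) true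
  if flag then (if m > (ans.length : Int) then subArray else ans) else ans

def solve (A : List Int) : List Int :=
  let n : Int := A.length
  (PySem.List.pyRange 0 n 1).foldl (fun ans s =>
    (PySem.List.pyRange s n 1).foldl (solveInner A s) ans) []

-- ===== PORT B =====
-- the loop body of B, named for the proofs; state = (best, cur)
def solveAltStep (st : List Int × List Int) (x : Int) : List Int × List Int :=
  if x < 0 then (st.1, ([] : List Int))
  else
    let cur := st.2 ++ [x]
    if (st.1.length : Int) < (cur.length : Int) then (cur, cur) else (st.1, cur)

def solve_alt (A : List Int) : List Int :=
  (A.foldl solveAltStep ([], [])).1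

-- ===== PRECONDITION & SPEC =====
def Spec_solve (A : List Int) (out : List Int) : Prop := out = solve_alt A
instance (A : List Int) (out : List Int) : Decidable (Spec_solve A out) := by unfold Spec_solve; infer_instance

-- ===== CLAIM (what is proved, stated in full; the proofs are below) =====
def Claim_equal_solve : Prop := ∀ (A : List Int), Dom_solve A → Spec_solve A (solve A)

-- ===== LEMMAS AND PROOFS =====

-- the nonnegativity predicate of both programs
def pvNN (x : Int) : Bool := decide (0 ≤ x)

-- "keep the first longest" update step
def pvStep (b r : List Int) : List Int := if b.length < r.length then r else b

-- the greedy all-nonnegative run starting at position s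
def pvRun (A : List Int) (s : Nat) : List Int := (A.drop s).takeWhile pvNN

-- common characterisation of both programs: fold the first-longest update over all starts
def pvG (A : List Int) : List Int :=
  (List.range A.length).foldl (fun b s => pvStep b (pvRun A s)) []

-- A's flag loop is List.all pvNN
theorem pvFlag_eq (l : List Int) : ∀ (b : Bool),
    l.foldl (fun f num => if num < 0 then false else f) b = (b && l.all pvNN) := by
  induction l with
  | nil => intro b; simp
  | cons x xs ih =>
      intro b
      simp only [List.foldl_cons, List.all_cons, ih]
      by_cases hx : x < 0
      · have h : pvNN x = false := by simp [pvNN]; omega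
        simp [hx, h]
      · have h : pvNN x = true := by simp [pvNN]; omega
        simp [hx, h]

theorem pvRun_length_le (A : List Int) (s : Nat) : (pvRun A s).length ≤ A.length - s := by
  have h := (List.takeWhile_prefix (l := A.drop s) pvNN).length_le
  simpa [pvRun] using h

-- a prefix of length k is all-nonnegative iff k does not exceed the greedy run
theorem pvTake_all_iff (l : List Int) : ∀ (k : Nat), k ≤ l.length →
    (((l.take k).all pvNN = true) ↔ k ≤ (l.takeWhile pvNN).length) := by
  induction l with
  | nil =>
      intro k hk
      simp only [List.length_nil, Nat.le_zero] at hk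
      subst hk; simp
  | cons x xs ih =>
      intro k hk
      cases k with
      | zero => simp
      | succ k =>
          simp only [List.take_succ_cons, List.all_cons, List.takeWhile_cons]
          by_cases hx : pvNN x = true
          · rw [if_pos hx]
            simp only [hx, Bool.true_and, List.length_cons]
            rw [ih k (by simpa using hk)]
            omega
          · have hx' : pvNN x = false := by simpa using hx
            simp [hx']

-- the greedy run is the prefix of its own length
theorem pvRun_eq_take (l : List Int) : l.takeWhile pvNN = l.take (l.takeWhile pvNN).length :=
  List.prefix_iff_eq_take.mp (List.takeWhile_prefix pvNN)

-- pvStep never shrinks below its second argument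
theorem pvStep_length_ge (b r : List Int) : r.length ≤ (pvStep b r).length := by
  unfold pvStep; split <;> omega

theorem pvStep_nil (b : List Int) : pvStep b [] = b := by
  unfold pvStep; simp

-- a fold of pvStep over runs none of which beats b leaves b unchanged
theorem pvNoUpdate {ι : Type} (l : List ι) (f : ι → List Int) : ∀ (b : List Int),
    (∀ i ∈ l, (f i).length ≤ b.length) →
    l.foldl (fun b i => pvStep b (f i)) b = b := by
  induction l with
  | nil => intro b _; rfl
  | cons i l ih =>
      intro b h
      have hi : (f i).length ≤ b.length := h i (by simp)
      have hstep : pvStep b (f i) = b := by unfold pvStep; split <;> first | omega | rfl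
      simp only [List.foldl_cons, hstep]
      exact ih b (fun j hj => h j (by simp [hj]))

-- a fold of pvStep whose head dominates all later runs is a single pvStep
theorem pvFirstLongest {ι : Type} (l : List ι) (f : ι → List Int) (h0 : ι) (b : List Int)
    (h : ∀ i ∈ l, (f i).length ≤ (f h0).length) :
    (h0 :: l).foldl (fun b i => pvStep b (f i)) b = pvStep b (f h0) := by
  simp only [List.foldl_cons]
  exact pvNoUpdate l f _ (fun i hi => le_trans (h i hi) (pvStep_length_ge b (f h0)))

-- ===== A's inner loop computes one pvStep =====
theorem pvInner (A : List Int) (s : Nat) : ∀ (d e0 : Nat) (ans : List Int), s ≤ e0 → e0 + d = A.length →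
    (PySem.List.pyRange (e0 : Int) (A.length : Int) 1).foldl (solveInner A (s : Int)) ans =
      if e0 - s < (pvRun A s).length ∧ ans.length < (pvRun A s).length then pvRun A s else ans := by
  intro d
  induction d with
  | zero =>
      intro e0 ans hs h0
      rw [PySem.List.pyRange_one_eq_nil (by exact_mod_cast (by omega : A.length ≤ e0))]
      have ht := pvRun_length_le A s
      rw [List.foldl_nil, if_neg]
      rintro ⟨h1, -⟩; omega
  | succ d ih =>
      intro e0 ans hs h0
      have he : e0 < A.length := by omega
      rw [PySem.List.pyRange_one_cons (by exact_mod_cast he), List.foldl_cons]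
      have hcast : ((e0 : Int) + 1) = (((e0 + 1 : Nat)) : Int) := by push_cast; ring
      have hsub : PySem.List.slice A (some (s : Int)) (some ((e0 : Int) + 1)) =
          (A.drop s).take (e0 + 1 - s) := by
        rw [hcast, PySem.List.slice_natCast]
      have hlen : ((A.drop s).take (e0 + 1 - s)).length = e0 + 1 - s := by
        simp only [List.length_take, List.length_drop]; omega
      have hall := pvTake_all_iff (A.drop s) (e0 + 1 - s)
        (by simp only [List.length_drop]; omega)
      have hstep : solveInner A (s : Int) ans (e0 : Int) =
          if e0 + 1 - s ≤ (pvRun A s).length ∧ ans.length < e0 + 1 - s then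
            (A.drop s).take (e0 + 1 - s) else ans := by
        unfold solveInner
        rw [hsub]
        simp only [pvFlag_eq, Bool.true_and]
        by_cases hf : e0 + 1 - s ≤ (pvRun A s).length
        · rw [if_pos (hall.mpr hf)]
          by_cases hm : ans.length < e0 + 1 - s
          · rw [if_pos (by rw [hlen]; exact_mod_cast hm), if_pos ⟨hf, hm⟩]
          · rw [if_neg (by rw [hlen]; exact_mod_cast hm), if_neg (by tauto)]
        · rw [if_neg (by intro hc; exact hf (hall.mp hc)), if_neg (by tauto)]
      rw [hstep, hcast]
      by_cases hf : e0 + 1 - s ≤ (pvRun A s).length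
      · by_cases hm : ans.length < e0 + 1 - s
        · rw [if_pos ⟨hf, hm⟩, ih (e0 + 1) _ (by omega) (by omega)]
          by_cases hlast : e0 + 1 - s < (pvRun A s).length
          · rw [if_pos ⟨by omega, by rw [hlen]; omega⟩, if_pos ⟨by omega, by omega⟩]
          · have hteq : (pvRun A s).length = e0 + 1 - s := by omega
            have htr : (A.drop s).take (e0 + 1 - s) = pvRun A s := by
              rw [← hteq]; exact (pvRun_eq_take (A.drop s)).symm
            rw [if_neg (by rw [hlen]; omega), if_pos ⟨by omega, by omega⟩, htr]
        · rw [if_neg (by omega), ih (e0 + 1) _ (by omega) (by omega)]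
          by_cases hd : e0 - s < (pvRun A s).length ∧ ans.length < (pvRun A s).length
          · rw [if_pos ⟨by omega, hd.2⟩, if_pos hd]
          · rw [if_neg (by omega), if_neg hd]
      · rw [if_neg (by tauto), ih (e0 + 1) _ (by omega) (by omega)]
        rw [if_neg (by omega), if_neg (by omega)]

theorem solve_eq_pvG (A : List Int) : solve A = pvG A := by
  simp only [solve, pvG]
  rw [PySem.List.pyRange_zero_natCast, List.foldl_map]
  apply List.foldl_ext
  intro b s hs
  have hs' : s < A.length := List.mem_range.mp hs
  rw [pvInner A s (A.length - s) s b le_rfl (by omega)]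
  unfold pvStep
  by_cases hb : b.length < (pvRun A s).length
  · rw [if_pos ⟨by omega, hb⟩, if_pos hb]
  · rw [if_neg (by omega), if_neg hb]

-- ===== B's pass computes pvG =====
theorem pvRun_append_neg (ys : List Int) (x : Int) (hx : x < 0) (s : Nat) (hs : s ≤ ys.length) :
    pvRun (ys ++ [x]) s = pvRun ys s := by
  unfold pvRun
  rw [List.drop_append_of_le_length hs, List.takeWhile_append]
  have hx' : pvNN x = false := by simp [pvNN]; omega
  split
  · next h =>
      have hfull : List.takeWhile pvNN (ys.drop s) = ys.drop s :=
        (List.takeWhile_prefix _).eq_of_length h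
      simp [hx', hfull]
  · rfl

theorem pvG_append_neg (ys : List Int) (x : Int) (hx : x < 0) : pvG (ys ++ [x]) = pvG ys := by
  unfold pvG
  simp only [List.length_append, List.length_cons, List.length_nil, Nat.zero_add]
  rw [List.range_succ, List.foldl_append]
  simp only [List.foldl_cons, List.foldl_nil]
  have hlast : pvRun (ys ++ [x]) ys.length = [] := by
    unfold pvRun
    rw [List.drop_append_of_le_length le_rfl]
    have hx' : pvNN x = false := by simp [pvNN]; omega
    simp [hx']
  rw [hlast]
  unfold pvStep
  simp only [List.length_nil, Nat.not_lt_zero, if_false]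
  apply List.foldl_ext
  intro b s hs
  rw [pvRun_append_neg ys x hx s (Nat.le_of_lt (List.mem_range.mp hs))]

-- appending a nonnegative x extends every run that reaches the end and the new answer is
-- "keep the old one unless the extended current run beats it"
theorem pvG_append_nonneg (ys : List Int) (x : Int) (hx : ¬ x < 0) (k : Nat) (hk : k ≤ ys.length)
    (hall : (ys.drop k).all pvNN = true)
    (hbd : k = 0 ∨ ∃ y, ys[k-1]? = some y ∧ y < 0) :
    pvG (ys ++ [x]) =
      if (pvG ys).length < (ys.drop k).length + 1 then ys.drop k ++ [x] else pvG ys := by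
  have hx' : pvNN x = true := by simp [pvNN]; omega
  have hrun_lt : ∀ s, s < k → pvRun (ys ++ [x]) s = pvRun ys s := by
    intro s hsk
    obtain ⟨y, hy, hyneg⟩ : ∃ y, ys[k-1]? = some y ∧ y < 0 := by
      rcases hbd with h0 | h; · omega
      · exact h
    have hymem : y ∈ ys.drop s := by
      have : (ys.drop s)[k-1-s]? = some y := by
        rw [List.getElem?_drop]
        rw [show s + (k - 1 - s) = k - 1 by omega]
        exact hy
      exact List.mem_of_getElem? this
    unfold pvRun
    rw [List.drop_append_of_le_length (by omega), List.takeWhile_append]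
    split
    · next h =>
        have hfull : List.takeWhile pvNN (ys.drop s) = ys.drop s :=
          (List.takeWhile_prefix _).eq_of_length h
        have := List.takeWhile_eq_self_iff.mp hfull y hymem
        simp [pvNN] at this; omega
    · rfl
  have hrun_old : ∀ s, k ≤ s → pvRun ys s = ys.drop s := by
    intro s hks
    unfold pvRun
    apply List.takeWhile_eq_self_iff.mpr
    intro z hz
    have : z ∈ ys.drop k := by
      have : ys.drop s = (ys.drop k).drop (s - k) := by
        rw [List.drop_drop]
        congr 1
        omega
      rw [this] at hz
      exact List.mem_of_mem_drop hz
    exact (List.all_eq_true.mp hall) z this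
  have hrun_new : ∀ s, k ≤ s → s ≤ ys.length → pvRun (ys ++ [x]) s = ys.drop s ++ [x] := by
    intro s hks hsn
    unfold pvRun
    rw [List.drop_append_of_le_length hsn]
    apply List.takeWhile_eq_self_iff.mpr
    intro z hz
    rcases List.mem_append.mp hz with hz | hz
    · have h1 : List.takeWhile pvNN (ys.drop s) = ys.drop s := by
        have := hrun_old s hks; unfold pvRun at this; exact this
      exact List.takeWhile_eq_self_iff.mp h1 z hz
    · simp only [List.mem_singleton] at hz; subst hz; exact hx'
  set b1 : List Int := (List.range k).foldl (fun b s => pvStep b (pvRun ys s)) [] with hb1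
  have hold : pvG ys = pvStep b1 (ys.drop k) := by
    unfold pvG
    rw [show ys.length = k + (ys.length - k) by omega, List.range_add, List.foldl_append,
      List.foldl_map]
    have hsuf : ∀ b0 : List Int,
        (List.range (ys.length - k)).foldl (fun b j => pvStep b (pvRun ys (k + j))) b0 =
          (List.range (ys.length - k)).foldl (fun b j => pvStep b (ys.drop (k + j))) b0 :=
      fun b0 => List.foldl_ext _ _ b0
        (fun b j _ => by rw [hrun_old (k + j) (by omega)])
    rw [hsuf]
    rcases Nat.eq_zero_or_pos (ys.length - k) with hz | hpos
    · rw [hz]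
      simp only [List.range_zero, List.foldl_nil]
      rw [List.drop_eq_nil_of_le (by omega : ys.length ≤ k), pvStep_nil]
    · rw [show ys.length - k = (ys.length - k - 1) + 1 by omega, List.range_succ_eq_map]
      rw [pvFirstLongest _ (fun j => ys.drop (k + j)) 0 b1 ?_]
      · simp
      · intro i _
        simp only [List.length_drop]; omega
  have hnew : pvG (ys ++ [x]) = pvStep b1 (ys.drop k ++ [x]) := by
    unfold pvG
    simp only [List.length_append, List.length_cons, List.length_nil, Nat.zero_add]
    rw [show ys.length + 1 = k + (ys.length + 1 - k) by omega, List.range_add, List.foldl_append,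
      List.foldl_map]
    have hpre : (List.range k).foldl (fun b s => pvStep b (pvRun (ys ++ [x]) s)) [] =
        (List.range k).foldl (fun b s => pvStep b (pvRun ys s)) [] :=
      List.foldl_ext _ _ []
        (fun b s hs => by rw [hrun_lt s (List.mem_range.mp hs)])
    rw [hpre]
    have hsuf : ∀ b0 : List Int,
        (List.range (ys.length + 1 - k)).foldl
            (fun b j => pvStep b (pvRun (ys ++ [x]) (k + j))) b0 =
          (List.range (ys.length + 1 - k)).foldl
            (fun b j => pvStep b (ys.drop (k + j) ++ [x])) b0 :=
      fun b0 => List.foldl_ext _ _ b0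
        (fun b j hj => by
          have hj' := List.mem_range.mp hj
          rw [hrun_new (k + j) (by omega) (by omega)])
    rw [hsuf]
    rw [show ys.length + 1 - k = (ys.length - k) + 1 by omega, List.range_succ_eq_map]
    rw [pvFirstLongest _ (fun j => ys.drop (k + j) ++ [x]) 0 b1 ?_]
    · simp
    · intro i _
      simp only [List.length_append, List.length_drop, List.length_cons, List.length_nil]
      omega
  rw [hnew, hold]
  unfold pvStep
  simp only [List.length_append, List.length_cons, List.length_nil, Nat.zero_add]
  split_ifs <;> first | rfl | omega

theorem pvB (A : List Int) :
    (A.foldl solveAltStep ([], [])).1 = pvG A ∧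
      ∃ k, k ≤ A.length ∧ (A.foldl solveAltStep ([], [])).2 = A.drop k ∧
        (A.drop k).all pvNN = true ∧ (k = 0 ∨ ∃ y, A[k-1]? = some y ∧ y < 0) := by
  induction A using List.reverseRecOn with
  | nil => exact ⟨rfl, 0, by simp, by simp, by simp, Or.inl rfl⟩
  | append_singleton ys x ih =>
      obtain ⟨hb, k, hk, hc, hall, hbd⟩ := ih
      rw [List.foldl_append]
      simp only [List.foldl_cons, List.foldl_nil]
      by_cases hx : x < 0
      · refine ⟨?_, ys.length + 1, by simp, ?_, ?_, Or.inr ⟨x, ?_, hx⟩⟩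
        · show (solveAltStep _ x).1 = _
          rw [pvG_append_neg ys x hx]
          simp only [solveAltStep, if_pos hx]
          exact hb
        · show (solveAltStep _ x).2 = _
          simp only [solveAltStep, if_pos hx]
          rw [List.drop_eq_nil_of_le (by simp)]
        · rw [List.drop_eq_nil_of_le (by simp)]; simp
        · show (ys ++ [x])[ys.length + 1 - 1]? = some x
          rw [Nat.add_sub_cancel]
          exact List.getElem?_concat_length
      · have hGnew := pvG_append_nonneg ys x hx k hk hall hbd
        refine ⟨?_, k, by simp; omega, ?_, ?_, ?_⟩
        · show (solveAltStep _ x).1 = _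
          simp only [solveAltStep, if_neg hx]
          rw [hGnew, hb, hc]
          by_cases hcmp : (pvG ys).length < (ys.drop k).length + 1
          · rw [if_pos (by simp only [List.length_append, List.length_cons, List.length_nil]; push_cast; omega), if_pos hcmp]
          · rw [if_neg (by simp only [List.length_append, List.length_cons, List.length_nil]; push_cast; omega), if_neg hcmp]
        · show (solveAltStep _ x).2 = _
          simp only [solveAltStep, if_neg hx]
          rw [hc, List.drop_append_of_le_length hk]
          split <;> rfl
        · rw [List.drop_append_of_le_length hk, List.all_append, hall]
          simp [pvNN]; omega
        · rcases hbd with h0 | ⟨y, hy, hyneg⟩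
          · exact Or.inl h0
          · refine Or.inr ⟨y, ?_, hyneg⟩
            rw [List.getElem?_append_left (by
              have := (List.getElem?_eq_some_iff.mp hy).1
              omega)]
            exact hy

theorem solve_alt_eq_pvG (A : List Int) : solve_alt A = pvG A := (pvB A).1

-- ===== VERDICT (by name: the statement is the Claim_ definition above) =====
theorem solve_spec : Claim_equal_solve := by
  intro A _
  unfold Spec_solve
  rw [solve_eq_pvG, solve_alt_eq_pvG]
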